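-- pv_equiv track=rewrite | github.com/felipecbitencourt/EEG-Math | scripts/normalize_eeg_math.py | _parse_english_number_phrase
-- ===== SOURCE A (Python) =====
-- _EN_NUM_UNITS = {
--     "zero": 0, "one": 1, "two": 2, "three": 3, "four": 4, "five": 5, "six": 6, "seven": 7, "eight": 8, "nine": 9,
--     "ten": 10, "eleven": 11, "twelve": 12, "thirteen": 13, "fourteen": 14, "fifteen": 15, "sixteen": 16,
--     "seventeen": 17, "eighteen": 18, "nineteen": 19,
-- }
--
-- _EN_NUM_TENS = {
--     "twenty": 20, "thirty": 30, "forty": 40, "fifty": 50, "sixty": 60, "seventy": 70, "eighty": 80, "ninety": 90,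
-- }
--
-- def _parse_english_number_phrase(phrase: str):
--     """Converte 'sixty', 'seven', 'twenty four', 'twenty-four' em inteiro (1–99)."""
--     phrase = phrase.lower().strip().replace("-", " ")
--     parts = phrase.split()
--     if not parts:
--         return None
--     total = 0
--     i = 0
--     while i < len(parts):
--         w = parts[i]
--         if w in _EN_NUM_TENS:
--             total += _EN_NUM_TENS[w]
--             i += 1
--             if i < len(parts) and parts[i] in _EN_NUM_UNITS and parts[i] not in _EN_NUM_TENS:
--                 total += _EN_NUM_UNITS[parts[i]]
--                 i += 1
--         elif w in _EN_NUM_UNITS: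
--             total += _EN_NUM_UNITS[w]
--             i += 1
--         else:
--             return None
--     return total if total > 0 else None
-- ===== SOURCE B (Python) =====
-- _EN_NUM_UNITS = {
--     "zero": 0, "one": 1, "two": 2, "three": 3, "four": 4, "five": 5, "six": 6, "seven": 7, "eight": 8, "nine": 9,
--     "ten": 10, "eleven": 11, "twelve": 12, "thirteen": 13, "fourteen": 14, "fifteen": 15, "sixteen": 16,
--     "seventeen": 17, "eighteen": 18, "nineteen": 19,
-- }
--
-- _EN_NUM_TENS = {
--     "twenty": 20, "thirty": 30, "forty": 40, "fifty": 50, "sixty": 60, "seventy": 70, "eighty": 80, "ninety": 90,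
-- }
--
-- _EN_NUM_ALL = {**_EN_NUM_UNITS, **_EN_NUM_TENS}
--
-- def _parse_english_number_phrase(phrase: str):
--     """Converte 'sixty', 'seven', 'twenty four', 'twenty-four' em inteiro (1–99)."""
--     parts = phrase.lower().strip().replace("-", " ").split()
--     if not parts:
--         return None
--     total = 0
--     for w in parts:
--         if w not in _EN_NUM_ALL:
--             return None
--         total += _EN_NUM_ALL[w]
--     return total if total > 0 else None
-- ===== Notes on version B (the rewrite author's own statement) =====
-- stated objective: simpler
-- what changed: Replaces A's while-loop state machine (tens word, then conditional lookahead consuming a following unit word) with a single flat for-loop over one merged word-to-value dict, summing values; the lookahead is redundant because consuming the unit in the same iteration or the next adds the same value.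
import Mathlib
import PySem

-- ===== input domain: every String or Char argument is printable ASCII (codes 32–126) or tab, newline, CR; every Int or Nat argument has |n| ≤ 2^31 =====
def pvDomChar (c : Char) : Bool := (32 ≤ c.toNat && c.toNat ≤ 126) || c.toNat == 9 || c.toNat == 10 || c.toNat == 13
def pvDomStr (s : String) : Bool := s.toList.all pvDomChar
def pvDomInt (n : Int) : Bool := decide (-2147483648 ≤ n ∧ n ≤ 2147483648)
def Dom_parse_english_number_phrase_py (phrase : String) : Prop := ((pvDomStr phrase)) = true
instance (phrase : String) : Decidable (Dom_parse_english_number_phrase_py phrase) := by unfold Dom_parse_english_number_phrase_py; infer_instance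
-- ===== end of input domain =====

-- B replaces A's tens-then-optional-unit lookahead state machine by a single flat pass over one
-- merged word→value dict (the lookahead consumption is redundant); objective: simpler.


-- ===== PORT A =====
def unitsA : PySem.Dict String Int := PySem.Dict.mk
  [("zero",0),("one",1),("two",2),("three",3),("four",4),("five",5),("six",6),("seven",7),("eight",8),("nine",9),
   ("ten",10),("eleven",11),("twelve",12),("thirteen",13),("fourteen",14),("fifteen",15),("sixteen",16),
   ("seventeen",17),("eighteen",18),("nineteen",19)]

def tensA : PySem.Dict String Int := PySem.Dict.mk
  [("twenty",20),("thirty",30),("forty",40),("fifty",50),("sixty",60),("seventy",70),("eighty",80),("ninety",90)]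

-- the while loop of A, one call per loop entry; the post-loop 'total if total > 0 else None' is the [] case
def loopA : List String → Int → Option Int
  | [], total => if total > 0 then some total else none
  | w :: rest, total =>
    if tensA.contains w then
      -- total += _EN_NUM_TENS[w]; i += 1; optional unit lookahead
      match rest with
      | w2 :: rest2 =>
        if unitsA.contains w2 && !tensA.contains w2 then
          loopA rest2 (total + tensA.getD w 0 + unitsA.getD w2 0)
        else
          loopA (w2 :: rest2) (total + tensA.getD w 0)
      | [] => loopA [] (total + tensA.getD w 0)
    else if unitsA.contains w then
      loopA rest (total + unitsA.getD w 0)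
    else
      none

def parse_english_number_phrase_py (phrase : String) : Option Int :=
  let phrase := PySem.Str.replace (PySem.Str.strip (PySem.Str.lower phrase)) "-" " "
  let parts := PySem.Str.split₀ phrase
  if parts = [] then none
  else loopA parts 0

-- ===== PORT B =====
-- Source B's _EN_NUM_UNITS/_EN_NUM_TENS are the same literal dicts as A's: shared as unitsA/tensA
-- _EN_NUM_ALL = {**_EN_NUM_UNITS, **_EN_NUM_TENS}
def allB : PySem.Dict String Int := PySem.Dict.ofList (unitsA.items ++ tensA.items)

-- the for loop of B; the post-loop 'total if total > 0 else None' is the [] case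
def loopB : List String → Int → Option Int
  | [], total => if total > 0 then some total else none
  | w :: rest, total =>
    if allB.contains w then loopB rest (total + allB.getD w 0) else none

def parse_english_number_phrase_py_alt (phrase : String) : Option Int :=
  let parts := PySem.Str.split₀ (PySem.Str.replace (PySem.Str.strip (PySem.Str.lower phrase)) "-" " ")
  if parts = [] then none
  else loopB parts 0

-- ===== PRECONDITION & SPEC =====
def Spec_parse_english_number_phrase_py (phrase : String) (out : Option Int) : Prop := out = parse_english_number_phrase_py_alt phrase
instance (phrase : String) (out : Option Int) : Decidable (Spec_parse_english_number_phrase_py phrase out) := by unfold Spec_parse_english_number_phrase_py; infer_instance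

-- ===== CLAIM (what is proved, stated in full; the proofs are below) =====
def Claim_equal_parse_english_number_phrase_py : Prop := ∀ (phrase : String), Dom_parse_english_number_phrase_py phrase → Spec_parse_english_number_phrase_py phrase (parse_english_number_phrase_py phrase)

-- ===== LEMMAS AND PROOFS =====

-- the merged dict computes to a literal association list
-- a dict built from an association list with fresh keys: lookup scans left to right
theorem get?_mk_append {κ ν : Type} [BEq κ] (l1 l2 : List (κ × ν)) (w : κ) :
    (PySem.Dict.mk (l1 ++ l2)).get? w =
      ((PySem.Dict.mk l1).get? w).or ((PySem.Dict.mk l2).get? w) := by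
  induction l1 with
  | nil => simp [PySem.Dict.get?]
  | cons p l1 ih =>
    rcases p with ⟨k, v⟩
    rw [List.cons_append, PySem.Dict.get?_mk_cons, PySem.Dict.get?_mk_cons]
    by_cases h : (k == w) = true
    · simp [h]
    · simp only [h, if_false, Bool.false_eq_true]
      exact ih

-- the merged dict is the two item lists concatenated (keys are disjoint, so no overwrite)
set_option maxHeartbeats 2000000 in
theorem allB_eq : allB = PySem.Dict.mk
  ([("zero",0),("one",1),("two",2),("three",3),("four",4),("five",5),("six",6),("seven",7),("eight",8),("nine",9),
    ("ten",10),("eleven",11),("twelve",12),("thirteen",13),("fourteen",14),("fifteen",15),("sixteen",16),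
    ("seventeen",17),("eighteen",18),("nineteen",19)] ++
   [("twenty",20),("thirty",30),("forty",40),("fifty",50),("sixty",60),("seventy",70),("eighty",80),("ninety",90)]) := by
  rfl

-- lookup in the merged dict = units first, then tens
theorem allB_get? (w : String) :
    allB.get? w = (unitsA.get? w).or (tensA.get? w) := by
  rw [allB_eq, get?_mk_append]
  rfl

-- the two source dicts have disjoint keys
theorem disj_ut (w : String) (h : unitsA.contains w = true) : tensA.contains w = false := by
  simp only [unitsA, PySem.Dict.contains_mk, List.any_cons, List.any_nil, Bool.or_eq_true,
    beq_iff_eq, Bool.false_eq_true] at h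
  rcases h with h|h|h|h|h|h|h|h|h|h|h|h|h|h|h|h|h|h|h|h|h <;>
    first | (subst h; decide) | exact h.elim

theorem disj_tu (w : String) (h : tensA.contains w = true) : unitsA.contains w = false := by
  simp only [tensA, PySem.Dict.contains_mk, List.any_cons, List.any_nil, Bool.or_eq_true,
    beq_iff_eq, Bool.false_eq_true] at h
  rcases h with h|h|h|h|h|h|h|h|h <;>
    first | (subst h; decide) | exact h.elim

theorem allB_of_tens (w : String) (h : tensA.contains w = true) :
    allB.contains w = true ∧ allB.getD w 0 = tensA.getD w 0 := by
  have hu : unitsA.get? w = none := (PySem.Dict.get?_eq_none_iff_contains _ _).mpr (disj_tu w h)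
  have hg : allB.get? w = tensA.get? w := by rw [allB_get?, hu, Option.none_or]
  constructor
  · rw [PySem.Dict.contains_eq_isSome_get?, hg, ← PySem.Dict.contains_eq_isSome_get?]; exact h
  · rw [PySem.Dict.getD_eq_get?_getD, hg, PySem.Dict.getD_eq_get?_getD]

theorem allB_of_units (w : String) (h : unitsA.contains w = true) :
    allB.contains w = true ∧ allB.getD w 0 = unitsA.getD w 0 := by
  have hs : (unitsA.get? w).isSome := by rw [← PySem.Dict.contains_eq_isSome_get?]; exact h
  obtain ⟨v, hv⟩ := Option.isSome_iff_exists.mp hs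
  have hg : allB.get? w = unitsA.get? w := by rw [allB_get?, hv, Option.some_or]
  constructor
  · rw [PySem.Dict.contains_eq_isSome_get?, hg, ← PySem.Dict.contains_eq_isSome_get?]; exact h
  · rw [PySem.Dict.getD_eq_get?_getD, hg, PySem.Dict.getD_eq_get?_getD]

theorem allB_of_neither (w : String) (ht : tensA.contains w = false)
    (hu : unitsA.contains w = false) : allB.contains w = false := by
  have h1 : unitsA.get? w = none := (PySem.Dict.get?_eq_none_iff_contains _ _).mpr hu
  have h2 : tensA.get? w = none := (PySem.Dict.get?_eq_none_iff_contains _ _).mpr ht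
  have hg : allB.get? w = none := by rw [allB_get?, h1, h2, Option.none_or]
  rw [PySem.Dict.contains_eq_isSome_get?, hg]; rfl

theorem loop_eq (n : Nat) : ∀ (parts : List String), parts.length ≤ n →
    ∀ total, loopA parts total = loopB parts total := by
  induction n with
  | zero =>
    intro parts h total
    match parts with
    | [] => rfl
  | succ n ih =>
    intro parts h total
    match parts with
    | [] => rfl
    | [w] =>
      by_cases ht : tensA.contains w = true
      · obtain ⟨hc, hv⟩ := allB_of_tens w ht
        simp [loopA, loopB, ht, hc, hv]
      · have ht' : tensA.contains w = false := by
          revert ht; cases tensA.contains w <;> simp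
        by_cases hu : unitsA.contains w = true
        · obtain ⟨hc, hv⟩ := allB_of_units w hu
          simp [loopA, loopB, ht', hu, hc, hv]
        · have hu' : unitsA.contains w = false := by
            revert hu; cases unitsA.contains w <;> simp
          have hc := allB_of_neither w ht' hu'
          simp [loopA, loopB, ht', hu', hc]
    | w :: w2 :: rest2 =>
      by_cases ht : tensA.contains w = true
      · obtain ⟨hc, hv⟩ := allB_of_tens w ht
        by_cases hu2 : unitsA.contains w2 = true
        · obtain ⟨hc2, hv2⟩ := allB_of_units w2 hu2
          have ht2 : tensA.contains w2 = false := disj_ut w2 hu2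
          simp only [loopA, loopB, ht, hu2, ht2, hc, hv, hc2, hv2,
            Bool.not_false, Bool.and_true, if_true]
          exact ih rest2 (by simp at h ⊢; omega) _
        · have hu2' : unitsA.contains w2 = false := by
            revert hu2; cases unitsA.contains w2 <;> simp
          simp only [loopA, loopB, ht, hu2', hc, hv, Bool.false_and, if_true,
            Bool.false_eq_true, if_false]
          exact ih (w2 :: rest2) (by simp at h ⊢; omega) _
      · have ht' : tensA.contains w = false := by
          revert ht; cases tensA.contains w <;> simp
        by_cases hu : unitsA.contains w = true
        · obtain ⟨hc, hv⟩ := allB_of_units w hu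
          simp only [loopA, loopB, ht', hu, hc, hv, if_true,
            Bool.false_eq_true, if_false]
          exact ih (w2 :: rest2) (by simp at h ⊢; omega) _
        · have hu' : unitsA.contains w = false := by
            revert hu; cases unitsA.contains w <;> simp
          have hc := allB_of_neither w ht' hu'
          simp [loopA, loopB, ht', hu', hc]

-- ===== VERDICT (by name: the statement is the Claim_ definition above) =====
theorem parse_english_number_phrase_py_spec : Claim_equal_parse_english_number_phrase_py := by
  intro phrase _
  unfold Spec_parse_english_number_phrase_py
  simp only [parse_english_number_phrase_py, parse_english_number_phrase_py_alt]
  generalize PySem.Str.split₀ (PySem.Str.replace (PySem.Str.strip (PySem.Str.lower phrase)) "-" " ") = parts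
  by_cases h : parts = []
  · rw [if_pos h, if_pos h]
  · rw [if_neg h, if_neg h]
    exact loop_eq parts.length parts le_rfl 0
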